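-- pv_equiv track=rewrite | github.com/ahol77/Computational-Physics-Final | agents.py | death
-- ===== SOURCE A (Python) =====
-- def death(agent):
--     death_list = []
--     for i in range(len(agent)):
--         if agent[i][1] == 0:
--             death_list.append(i)
--     for j in range(len(death_list)):
--         spot = death_list[j]
--         del agent[spot - j]
--     return agent
-- ===== SOURCE B (Python) =====
-- def death(agent):
--     # Single in-place backward sweep: deleting at i never shifts indices < i,
--     # so no index table / offset counter is needed. Mutates and returns `agent`
--     # like the original.
--     for i in range(len(agent) - 1, -1, -1):
--         if agent[i][1] == 0:
--             del agent[i]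
--     return agent
-- ===== Notes on version B (the rewrite author's own statement) =====
-- stated objective: simpler
-- what changed: Replaced A's two passes (build an index table of doomed positions, then delete with a spot-minus-j offset correction) by one backward in-place sweep that deletes immediately, needing no auxiliary list or counter.
import Mathlib
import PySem

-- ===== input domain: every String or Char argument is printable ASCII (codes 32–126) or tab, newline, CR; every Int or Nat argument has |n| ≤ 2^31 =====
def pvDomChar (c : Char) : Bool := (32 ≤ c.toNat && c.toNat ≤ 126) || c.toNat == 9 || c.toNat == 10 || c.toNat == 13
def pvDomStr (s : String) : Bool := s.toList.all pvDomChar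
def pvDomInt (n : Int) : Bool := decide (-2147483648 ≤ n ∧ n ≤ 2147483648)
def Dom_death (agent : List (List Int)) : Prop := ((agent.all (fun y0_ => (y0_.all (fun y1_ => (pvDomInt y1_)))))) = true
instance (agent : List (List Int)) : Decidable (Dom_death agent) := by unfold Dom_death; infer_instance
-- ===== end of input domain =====

-- B replaces A's two passes (index table + offset-corrected deletions) by one backward
-- in-place sweep deleting immediately; equal return value, and both mutate the argument
-- list in Python in the same way (same final contents of the same object).

-- `del l[n]` for an in-range nonnegative index n (all indices both ports delete at are
-- nonnegative and in range on inputs satisfying Pre_death)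
def pyDelAt {α : Type} (l : List α) (n : Nat) : List α := l.take n ++ l.drop (n + 1)

-- ===== PORT A =====
-- first loop: death_list collects the indices i (values of range, hence Nat) with agent[i][1] == 0;
-- second loop: del agent[spot - j] (spot ≥ j on Pre_death, so Nat subtraction is Python's subtraction)
def death (agent : List (List Int)) : List (List Int) :=
  let death_list : List Nat :=
    (List.range agent.length).foldl
      (fun acc i =>
        if (PySem.List.pyGet? ((PySem.List.pyGet? agent (Int.ofNat i)).getD []) 1).getD 0 = 0
        then acc ++ [i] else acc) []
  (List.range death_list.length).foldl
    (fun ag j => pyDelAt ag (death_list.getD j 0 - j)) agent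

-- ===== PORT B =====
-- for i in range(len(agent)-1, -1, -1): if agent[i][1] == 0: del agent[i]
def death_alt (agent : List (List Int)) : List (List Int) :=
  (PySem.List.pyRange ((agent.length : Int) - 1) (-1) (-1)).foldl
    (fun ag i =>
      if (PySem.List.pyGet? ((PySem.List.pyGet? ag i).getD []) 1).getD 0 = 0
      then pyDelAt ag i.toNat else ag) agent

-- ===== PRECONDITION & SPEC =====
-- Pre_death: every row has at least 2 entries — exactly where Python's agent[i][1] does not raise IndexError
def Pre_death (agent : List (List Int)) : Prop := ∀ x ∈ agent, 2 ≤ x.length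
instance (agent : List (List Int)) : Decidable (Pre_death agent) := by unfold Pre_death; infer_instance

def pvWitness_death : List (List Int) := [[1, 0], [2, 3], [5, 0]]

def Spec_death (agent : List (List Int)) (out : List (List Int)) : Prop := out = death_alt agent
instance (agent : List (List Int)) (out : List (List Int)) : Decidable (Spec_death agent out) := by unfold Spec_death; infer_instance

-- ===== CLAIM (what is proved, stated in full; the proofs are below) =====
def Claim_equal_death : Prop := ∀ (agent : List (List Int)), Dom_death agent → Pre_death agent → Spec_death agent (death agent)

-- ===== LEMMAS AND PROOFS =====

-- the survival test both programs apply to a row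
def pB (x : List Int) : Bool := (PySem.List.pyGet? x 1).getD 0 == 0

-- absolute positions of the doomed rows
def idxs : List (List Int) → List Nat
  | [] => []
  | x :: xs => if pB x then 0 :: (idxs xs).map (· + 1) else (idxs xs).map (· + 1)

-- A's second loop, as structural recursion over the index list with the deletion counter
def delLoop : List (List Int) → List Nat → Nat → List (List Int)
  | ag, [], _ => ag
  | ag, s :: rest, j => delLoop (pyDelAt ag (s - j)) rest (j + 1)

theorem pyDelAt_append_cons {α : Type} (pre : List α) (x : α) (l : List α) :
    pyDelAt (pre ++ x :: l) pre.length = pre ++ l := by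
  induction pre with
  | nil => simp [pyDelAt]
  | cons a t ih => simp [pyDelAt, List.drop] at ih ⊢

theorem idxs_range_filter (l : List (List Int)) :
    (List.range l.length).filter (fun i => pB (l.getD i [])) = idxs l := by
  induction l with
  | nil => simp [idxs]
  | cons x xs ih =>
      simp only [List.length_cons, List.range_succ_eq_map, List.filter_cons, List.filter_map]
      by_cases h : pB x
      · simp [idxs, h, ← ih, Function.comp_def, List.getD, Nat.succ_eq_add_one]
      · simp [idxs, h, ← ih, Function.comp_def, List.getD, Nat.succ_eq_add_one]

theorem range_foldl_delLoop (dl : List Nat) (c : Nat) (ag : List (List Int)) :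
    (List.range dl.length).foldl (fun a j => pyDelAt a (dl.getD j 0 - (j + c))) ag
      = delLoop ag dl c := by
  induction dl generalizing c ag with
  | nil => simp [delLoop]
  | cons s rest ih =>
      simp only [List.length_cons, List.range_succ_eq_map, List.foldl_cons, List.foldl_map]
      have : (fun (a : List (List Int)) (j : Nat) =>
          pyDelAt a ((s :: rest).getD (Nat.succ j) 0 - (Nat.succ j + c)))
        = fun a j => pyDelAt a (rest.getD j 0 - (j + (c + 1))) := by
        funext a j
        simp [List.getD]
        ring_nf
      rw [this, ih]
      simp [delLoop]

theorem delLoop_filter (l : List (List Int)) :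
    ∀ (pre : List (List Int)) (j : Nat),
      delLoop (pre ++ l) ((idxs l).map (· + (pre.length + j))) j
        = pre ++ l.filter (fun x => !pB x) := by
  induction l with
  | nil => intro pre j; simp [idxs, delLoop]
  | cons x xs ih =>
      intro pre j
      by_cases h : pB x
      · have hmap : ((idxs (x :: xs)).map (· + (pre.length + j)))
            = (pre.length + j) :: (idxs xs).map (· + (pre.length + (j + 1))) := by
          simp [idxs, h, List.map_map]
          omega
        rw [hmap]
        simp only [delLoop]
        have hdel : pyDelAt (pre ++ x :: xs) (pre.length + j - j) = pre ++ xs := by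
          have : pre.length + j - j = pre.length := by omega
          rw [this, pyDelAt_append_cons]
        rw [hdel, ih pre (j + 1)]
        simp [h]
      · have hmap : ((idxs (x :: xs)).map (· + (pre.length + j)))
            = (idxs xs).map (· + ((pre ++ [x]).length + j)) := by
          simp [idxs, h, List.map_map]
          omega
        rw [hmap]
        have hl : pre ++ x :: xs = (pre ++ [x]) ++ xs := by simp
        rw [hl, ih (pre ++ [x]) j]
        simp [h]

theorem death_eq_filter (agent : List (List Int)) :
    death agent = agent.filter (fun x => !pB x) := by
  unfold death
  have hdl : (List.range agent.length).foldl
      (fun acc i =>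
        if (PySem.List.pyGet? ((PySem.List.pyGet? agent (Int.ofNat i)).getD []) 1).getD 0 = 0
        then acc ++ [i] else acc) [] = idxs agent := by
    rw [PySem.List.foldl_append_ite_eq_filter]
    rw [← idxs_range_filter]
    apply List.filter_congr
    intro i hi
    have hi' : i < agent.length := List.mem_range.mp hi
    simp [pB, PySem.List.pyGet?_natCast, List.getElem?_eq_getElem hi', List.getD]
    rfl
  rw [hdl]
  have := range_foldl_delLoop (idxs agent) 0 agent
  simp only [Nat.add_zero] at this
  rw [this]
  have := delLoop_filter agent [] 0
  simpa using this

theorem death_alt_eq_filter (agent : List (List Int)) :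
    death_alt agent = agent.filter (fun x => !pB x) := by
  suffices h : ∀ (pre tail : List (List Int)),
      (PySem.List.pyRange ((pre.length : Int) - 1) (-1) (-1)).foldl
        (fun ag i =>
          if (PySem.List.pyGet? ((PySem.List.pyGet? ag i).getD []) 1).getD 0 = 0
          then pyDelAt ag i.toNat else ag) (pre ++ tail)
        = pre.filter (fun x => !pB x) ++ tail by
    have := h agent []
    simpa [death_alt] using this
  intro pre
  induction pre using List.reverseRecOn with
  | nil => intro tail; simp [PySem.List.pyRange_neg_one_eq_nil]
  | append_singleton q x ih =>
      intro tail
      have hlen : ((q ++ [x]).length : Int) - 1 = (q.length : Int) := by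
        simp
      rw [hlen, PySem.List.pyRange_neg_one_cons (by omega)]
      simp only [List.foldl_cons]
      have hget : (PySem.List.pyGet? ((q ++ [x]) ++ tail) (q.length : Int)).getD [] = x := by
        rw [PySem.List.pyGet?_natCast]
        simp [List.append_assoc]
      by_cases h : pB x
      · have hcond : (PySem.List.pyGet? ((PySem.List.pyGet? ((q ++ [x]) ++ tail) (q.length : Int)).getD []) 1).getD 0 = 0 := by
          rw [hget]; simpa [pB] using h
        rw [if_pos hcond]
        have hdel : pyDelAt ((q ++ [x]) ++ tail) ((q.length : Int)).toNat = q ++ tail := by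
          have : ((q.length : Int)).toNat = q.length := by simp
          rw [this, List.append_assoc]
          exact pyDelAt_append_cons q x tail
        rw [hdel]
        have : ((q.length : Int)) - 1 + 1 - 1 = (q.length : Int) - 1 := by ring
        rw [ih tail]
        simp [List.filter_append, h]
      · have hcond : ¬ (PySem.List.pyGet? ((PySem.List.pyGet? ((q ++ [x]) ++ tail) (q.length : Int)).getD []) 1).getD 0 = 0 := by
          rw [hget]; simpa [pB] using h
        rw [if_neg hcond]
        have hl : (q ++ [x]) ++ tail = q ++ (x :: tail) := by simp
        rw [hl, ih (x :: tail)]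
        simp [List.filter_append, h]

-- ===== VERDICT (by name: the statement is the Claim_ definition above) =====
theorem death_spec : Claim_equal_death := by
  intro agent _ _
  unfold Spec_death
  rw [death_eq_filter, death_alt_eq_filter]
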